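-- pv_equiv track=rewrite | github.com/TeamVato/Bet-That | scripts/fix-makefile.py | ensure_line
-- ===== SOURCE A (Python) =====
-- from typing import Iterable, List, Tuple
--
-- def ensure_line(lines: List[str], new_line: str) -> Tuple[List[str], bool]:
--     if any(l.strip() == new_line for l in lines):
--         return lines, False
--     insert_at = 0
--     for idx, line in enumerate(lines):
--         if line.strip() and not line.strip().startswith("#"):
--             insert_at = idx
--             break
--     else:
--         insert_at = len(lines)
--     return lines[:insert_at] + [new_line, ""] + lines[insert_at:], True
-- ===== SOURCE B (Python) =====
-- from typing import List, Tuple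
--
-- def ensure_line(lines: List[str], new_line: str) -> Tuple[List[str], bool]:
--     # membership via a hash set of stripped lines, then a recursive rebuild:
--     # walk the list, copying leading blank/comment lines, and splice the new
--     # line in front of the first real line (or at the end), no indices/slices.
--     if new_line in {l.strip() for l in lines}:
--         return lines, False
--     return _splice(lines, new_line), True
--
-- def _splice(lines: List[str], new_line: str) -> List[str]:
--     if not lines:
--         return [new_line, ""]
--     head = lines[0].strip()
--     if head and not head.startswith("#"):
--         return [new_line, ""] + lines
--     return [lines[0]] + _splice(lines[1:], new_line)
-- ===== Notes on version B (the rewrite author's own statement) =====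
-- stated objective: alternative
-- what changed: Replaces A's index-based decomposition (enumerate loop with break computing insert_at, then slicing) by a structural recursion that rebuilds the list directly, splicing the new line before the first non-blank non-comment line, with the presence test done on a set of stripped lines.
import Mathlib
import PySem

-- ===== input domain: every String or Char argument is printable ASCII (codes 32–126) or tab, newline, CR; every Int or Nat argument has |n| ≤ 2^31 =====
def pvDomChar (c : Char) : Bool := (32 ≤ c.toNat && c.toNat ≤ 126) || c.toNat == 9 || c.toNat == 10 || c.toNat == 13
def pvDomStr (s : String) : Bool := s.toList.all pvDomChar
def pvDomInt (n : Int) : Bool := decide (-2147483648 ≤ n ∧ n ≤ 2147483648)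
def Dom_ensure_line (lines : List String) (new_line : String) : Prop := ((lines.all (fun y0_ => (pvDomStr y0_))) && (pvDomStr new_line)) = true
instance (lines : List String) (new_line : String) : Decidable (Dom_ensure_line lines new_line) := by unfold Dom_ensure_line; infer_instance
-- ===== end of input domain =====

-- B replaces A's index computation + slicing by a structural recursion that rebuilds
-- the list, splicing the new line before the first non-blank non-comment line,
-- with the presence test done on a set of stripped lines (alternative decomposition).

-- ===== PORT A =====
-- the for/else loop with break: first idx whose stripped line is non-empty and not '#'-prefixed, else len
def ensureFindA (rest : List String) (idx : Nat) (default : Nat) : Nat :=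
  match rest with
  | [] => default
  | l :: rest' =>
    let s := PySem.Str.strip l
    if (s != "" && !(PySem.Str.startswith s "#")) then idx else ensureFindA rest' (idx + 1) default

def ensure_line (lines : List String) (new_line : String) : List String × Bool :=
  if lines.any (fun l => PySem.Str.strip l == new_line) then (lines, false)
  else
    let insert_at := ensureFindA lines 0 lines.length
    (PySem.List.slice lines none (some (insert_at : Int)) ++ [new_line, ""] ++
      PySem.List.slice lines (some (insert_at : Int)) none, true)

-- ===== PORT B =====
-- _splice: recursive rebuild, copying leading blank/comment lines, splicing before the first real line
def ensureSpliceB (lines : List String) (new_line : String) : List String :=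
  match lines with
  | [] => [new_line, ""]
  | l :: rest =>
    let head := PySem.Str.strip l
    if head != "" && !(PySem.Str.startswith head "#") then new_line :: "" :: l :: rest
    else l :: ensureSpliceB rest new_line

def ensure_line_alt (lines : List String) (new_line : String) : List String × Bool :=
  if PySem.Set.contains (PySem.Set.ofList (lines.map PySem.Str.strip)) new_line then (lines, false)
  else (ensureSpliceB lines new_line, true)

-- ===== PRECONDITION & SPEC =====
def Spec_ensure_line (lines : List String) (new_line : String) (out : List String × Bool) : Prop := out = ensure_line_alt lines new_line
instance (lines : List String) (new_line : String) (out : List String × Bool) : Decidable (Spec_ensure_line lines new_line out) := by unfold Spec_ensure_line; infer_instance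

-- ===== CLAIM (what is proved, stated in full; the proofs are below) =====
def Claim_equal_ensure_line : Prop := ∀ (lines : List String) (new_line : String), Dom_ensure_line lines new_line → Spec_ensure_line lines new_line (ensure_line lines new_line)

-- ===== LEMMAS AND PROOFS =====

-- A's any() test and B's set-membership test are the same condition
theorem cond_eq (lines : List String) (new_line : String) :
    PySem.Set.contains (PySem.Set.ofList (lines.map PySem.Str.strip)) new_line
      = lines.any (fun l => PySem.Str.strip l == new_line) := by
  rw [Bool.eq_iff_iff]
  simp only [PySem.Set.contains, List.contains_iff_mem, PySem.Set.mem_ofList,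
    List.mem_map, List.any_eq_true, beq_iff_eq]

-- A's search index shifts by one when the start index and default shift by one
theorem findA_shift (rest : List String) :
    ∀ (idx n : Nat), ensureFindA rest (idx + 1) (n + 1) = ensureFindA rest idx n + 1 := by
  induction rest with
  | nil => intro idx n; simp [ensureFindA]
  | cons l rest' ih =>
    intro idx n
    simp only [ensureFindA]
    split <;> simp [ih]

-- slicing at A's computed index equals B's recursive splice
theorem splice_eq (new_line : String) :
    ∀ (lines : List String),
      lines.take (ensureFindA lines 0 lines.length) ++ [new_line, ""] ++
        lines.drop (ensureFindA lines 0 lines.length) = ensureSpliceB lines new_line := by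
  intro lines
  induction lines with
  | nil => simp [ensureFindA, ensureSpliceB]
  | cons l rest ih =>
    simp only [ensureFindA, ensureSpliceB]
    split_ifs with hp
    · simp
    · simp only [List.length_cons]
      rw [findA_shift rest 0 rest.length, List.take_succ_cons, List.drop_succ_cons]
      simp [← ih]

-- ===== VERDICT (by name: the statement is the Claim_ definition above) =====
theorem ensure_line_spec : Claim_equal_ensure_line := by
  intro lines new_line _
  unfold Spec_ensure_line ensure_line ensure_line_alt
  rw [cond_eq]
  by_cases h : lines.any (fun l => PySem.Str.strip l == new_line) = true
  · simp [h]
  · simp only [h, if_false, Bool.false_eq_true]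
    rw [PySem.List.slice_to_natCast, PySem.List.slice_from_natCast, splice_eq]
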